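-- pv_equiv track=rewrite | github.com/wm333300/Leetcode | subsetmake.py | los
-- ===== SOURCE A (Python) =====
-- def los(l):
--     ans = []
--     ind = len(l)
--     while ind > -1:
--         sub = []
--         for elem in l[:ind]:
--             sub.append(elem)
--         ans.append(sub)
--         ind -= 1
--     return ans
-- ===== SOURCE B (Python) =====
-- def los(l):
--     ans = [[]]
--     cur = []
--     for elem in l:
--         cur = cur + [elem]
--         ans.append(list(cur))
--     ans.reverse()
--     return ans
-- ===== Notes on version B (the rewrite author's own statement) =====
-- stated objective: alternative
-- what changed: Instead of re-slicing and copying a shrinking prefix on every iteration of a countdown loop, B grows one prefix forward in a single pass, snapshotting it after each element, and reverses the collected list at the end.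
import Mathlib
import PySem

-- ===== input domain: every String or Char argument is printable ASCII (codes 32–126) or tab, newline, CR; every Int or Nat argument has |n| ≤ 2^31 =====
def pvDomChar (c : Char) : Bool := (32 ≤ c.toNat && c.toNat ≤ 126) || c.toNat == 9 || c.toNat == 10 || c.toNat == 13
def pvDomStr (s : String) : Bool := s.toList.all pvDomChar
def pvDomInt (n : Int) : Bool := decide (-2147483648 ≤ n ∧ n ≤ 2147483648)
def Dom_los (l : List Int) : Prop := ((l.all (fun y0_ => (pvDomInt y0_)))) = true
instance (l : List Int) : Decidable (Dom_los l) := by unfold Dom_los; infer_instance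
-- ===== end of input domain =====

-- B grows one prefix forward in a single pass (snapshot after each element, reverse at the end)
-- instead of A's countdown loop that re-slices and copies a shrinking prefix each iteration.


-- ===== PORT A =====
-- sub = []; for elem in l[:ind]: sub.append(elem)
def losSub (l : List Int) (ind : Nat) : List Int :=
  (PySem.List.slice l none (some (ind : Int))).foldl (fun s e => s ++ [e]) []

-- while ind > -1: ans.append(sub); ind -= 1   (ind counts down from len(l) to 0)
def losGo (l : List Int) (ans : List (List Int)) : Nat → List (List Int)
  | 0 => ans ++ [losSub l 0]
  | ind + 1 => losGo l (ans ++ [losSub l (ind + 1)]) ind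

def los (l : List Int) : List (List Int) := losGo l [] l.length

-- ===== PORT B =====
def los_alt (l : List Int) : List (List Int) :=
  let p := l.foldl (fun (p : List (List Int) × List Int) e =>
      let cur := p.2 ++ [e]
      (p.1 ++ [cur], cur)) ([[]], ([] : List Int))
  p.1.reverse

-- ===== PRECONDITION & SPEC =====
def Spec_los (l : List Int) (out : List (List Int)) : Prop := out = los_alt l
instance (l : List Int) (out : List (List Int)) : Decidable (Spec_los l out) := by unfold Spec_los; infer_instance

-- ===== CLAIM (what is proved, stated in full; the proofs are below) =====
def Claim_equal_los : Prop := ∀ (l : List Int), Dom_los l → Spec_los l (los l)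

-- ===== LEMMAS AND PROOFS =====

theorem foldl_snoc (xs acc : List Int) :
    xs.foldl (fun s e => s ++ [e]) acc = acc ++ xs := by
  induction xs generalizing acc with
  | nil => simp
  | cons e t ih => simp [List.foldl_cons, ih]

theorem losSub_take (l : List Int) (ind : Nat) : losSub l ind = l.take ind := by
  rw [losSub, PySem.List.slice_to_natCast, foldl_snoc]; simp

theorem losGo_eq (l : List Int) (ans : List (List Int)) (ind : Nat) :
    losGo l ans ind = ans ++ ((List.range (ind + 1)).map (fun i => l.take i)).reverse := by
  induction ind generalizing ans with
  | zero => simp [losGo, losSub_take]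
  | succ n ih =>
      simp [losGo, ih, losSub_take, List.range_succ]

theorem map_range_succ_left {α : Type} (f : Nat → α) (n : Nat) :
    (List.range (n + 1)).map f = f 0 :: (List.range n).map (fun i => f (i + 1)) := by
  induction n with
  | zero => simp [List.range_succ]
  | succ n ih => rw [List.range_succ, List.map_append, ih]; simp [List.range_succ]

theorem alt_fold (l : List Int) (a : List (List Int)) (c : List Int) :
    (l.foldl (fun (p : List (List Int) × List Int) e =>
        let cur := p.2 ++ [e]
        (p.1 ++ [cur], cur)) (a, c)).1
      = a ++ (List.range l.length).map (fun i => c ++ l.take (i + 1)) := by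
  induction l generalizing a c with
  | nil => simp
  | cons e t ih =>
      simp only [List.foldl_cons, ih, List.length_cons, map_range_succ_left]
      simp [List.append_assoc, List.take_succ_cons]

-- ===== VERDICT (by name: the statement is the Claim_ definition above) =====

theorem los_spec : Claim_equal_los := by
  intro l _
  show los l = los_alt l
  simp only [los, los_alt, losGo_eq, alt_fold, List.nil_append]
  rw [map_range_succ_left]
  simp
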